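-- pv_equiv track=rewrite | github.com/aiunderstand/surfer-ternary-waveviewer | tools/png_to_rgb_vcd.py | make_identifier
-- ===== SOURCE A (Python) =====
-- def make_identifier(index: int) -> str:
--     printable = [chr(code) for code in range(33, 127) if chr(code) not in {'$', '#'}]
--     base = len(printable)
--     digits: list[str] = []
--     value = index
--
--     while True:
--         digits.append(printable[value % base])
--         value //= base
--         if value == 0:
--             return ''.join(reversed(digits))
-- ===== SOURCE B (Python) =====
-- def make_identifier(index: int) -> str:
--     printable = [chr(code) for code in range(33, 127) if chr(code) not in {'$', '#'}]
--     base = len(printable)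
--
--     def rec(v: int) -> str:
--         if v == 0:
--             return ''
--         return rec(v // base) + printable[v % base]
--
--     return printable[0] if index == 0 else rec(index)
-- ===== Notes on version B (the rewrite author's own statement) =====
-- stated objective: alternative
-- what changed: Replaces the accumulate-digits-then-reverse do-while loop with a recursion on the quotient chain that builds the identifier most-significant-first, eliminating the digits list and the reversed join. Pre_ excludes negative indices, on which A's loop never terminates.
import Mathlib
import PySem

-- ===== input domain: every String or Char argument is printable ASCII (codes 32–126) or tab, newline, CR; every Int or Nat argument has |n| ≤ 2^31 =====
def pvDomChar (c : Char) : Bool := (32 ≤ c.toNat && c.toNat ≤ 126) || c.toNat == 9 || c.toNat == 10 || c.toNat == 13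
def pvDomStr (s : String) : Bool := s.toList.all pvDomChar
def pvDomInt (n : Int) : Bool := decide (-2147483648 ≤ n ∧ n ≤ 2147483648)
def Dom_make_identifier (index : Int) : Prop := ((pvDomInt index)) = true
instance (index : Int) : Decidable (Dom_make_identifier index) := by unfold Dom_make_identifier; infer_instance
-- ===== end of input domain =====

-- B builds the identifier most-significant-first by recursion on the quotient chain, replacing A's append-then-reverse loop.


-- ===== PORT A =====
-- printable = [chr(code) for code in range(33, 127) if chr(code) not in {'$', '#'}]
def pvPrintable : List Char :=
  ((PySem.List.pyRange 33 127 1).filter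
      (fun code => ¬ (Char.ofNat code.toNat = '$' ∨ Char.ofNat code.toNat = '#'))).map
    (fun code => Char.ofNat code.toNat)

-- the do-while loop of A, on the (nonnegative, inside Pre_) value; appends digits then recurses
def pvLoopA (value : Nat) (digits : List Char) : List Char :=
  if h : value / pvPrintable.length = 0 then
    digits ++ [pvPrintable.getD (value % pvPrintable.length) ' ']
  else
    pvLoopA (value / pvPrintable.length)
      (digits ++ [pvPrintable.getD (value % pvPrintable.length) ' '])
termination_by value
decreasing_by
  exact Nat.div_lt_self (Nat.pos_of_ne_zero (fun hz => h (by simp [hz]))) (by decide)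

def make_identifier (index : Int) : String :=
  String.ofList (pvLoopA index.toNat []).reverse

-- ===== PORT B =====
-- rec(v) = '' if v == 0 else rec(v // base) + printable[v % base]
def pvRecB (v : Nat) : List Char :=
  if h : v = 0 then []
  else pvRecB (v / pvPrintable.length) ++ [pvPrintable.getD (v % pvPrintable.length) ' ']
termination_by v
decreasing_by
  exact Nat.div_lt_self (Nat.pos_of_ne_zero h) (by decide)

def make_identifier_alt (index : Int) : String :=
  if index = 0 then String.ofList [pvPrintable.getD 0 ' '] else String.ofList (pvRecB index.toNat)

-- ===== PRECONDITION & SPEC =====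
-- A's while-loop never terminates for negative index (value //= base stays negative), so Pre_ excludes index < 0.
def Pre_make_identifier (index : Int) : Prop := 0 ≤ index
instance (index : Int) : Decidable (Pre_make_identifier index) := by unfold Pre_make_identifier; infer_instance
def pvWitness_make_identifier : Int := 8463

def Spec_make_identifier (index : Int) (out : String) : Prop := out = make_identifier_alt index
instance (index : Int) (out : String) : Decidable (Spec_make_identifier index out) := by unfold Spec_make_identifier; infer_instance

-- ===== CLAIM (what is proved, stated in full; the proofs are below) =====
def Claim_equal_make_identifier : Prop := ∀ (index : Int), Dom_make_identifier index → Pre_make_identifier index → Spec_make_identifier index (make_identifier index)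

-- ===== LEMMAS AND PROOFS =====

-- A's reversed digit list is B's recursion (with the single digit printable[0] at v = 0)
theorem pvLoopA_reverse (v : Nat) (ds : List Char) :
    (pvLoopA v ds).reverse =
      (if v = 0 then [pvPrintable.getD 0 ' '] else pvRecB v) ++ ds.reverse := by
  fun_induction pvLoopA v ds with
  | case1 v ds _h =>
    -- value // base = 0 here: the loop returns after one digit
    by_cases hv : v = 0
    · subst hv; simp [pvRecB]
    · rw [if_neg hv]
      conv_rhs => rw [pvRecB, dif_neg hv, _h, pvRecB]
      simp
  | case2 v ds h ih =>
    have hv : v ≠ 0 := fun hz => h (by simp [hz])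
    rw [ih, if_neg h]
    conv_rhs => rw [pvRecB, dif_neg hv]
    simp [if_neg hv]

-- ===== VERDICT (by name: the statement is the Claim_ definition above) =====
theorem make_identifier_spec : Claim_equal_make_identifier := by
  intro index _ hpre
  have hp : 0 ≤ index := hpre
  unfold Spec_make_identifier make_identifier make_identifier_alt
  rw [pvLoopA_reverse]
  by_cases h0 : index = 0
  · simp [h0]
  · have : index.toNat ≠ 0 := by omega
    simp [h0, this]
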